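-- pv_equiv track=rewrite | github.com/josalhor/hermax | tests/model/test_bigm_mixed_int_boolsum_fastpath.py | _exists_sat_mixed
-- ===== SOURCE A (Python) =====
-- import itertools
--
-- def _exists_sat_mixed(
--     xdom: range,
--     nbool: int,
--     a: int,
--     k: int,
--     mcoef: int,
--     op: str = "<=",
-- ) -> bool:
--     for xv in xdom:
--         for yv in (0, 1):
--             for bits in itertools.product((0, 1), repeat=nbool):
--                 lhs = a * xv + sum(bits)
--                 rhs = k + mcoef * yv
--                 if op == "<=" and lhs <= rhs:
--                     return True
--                 if op == "<" and lhs < rhs: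
--                     return True
--     return False
-- ===== SOURCE B (Python) =====
-- def _exists_sat_mixed(
--     xdom,
--     nbool,
--     a,
--     k,
--     mcoef,
--     op="<=",
-- ):
--     # The minimal bit-sum over any number of boolean bits is 0 and the best
--     # right-hand side is k + max(mcoef, 0), so a single scan over xdom suffices.
--     bound = k + (mcoef if mcoef > 0 else 0)
--     if op == "<=":
--         return any(a * xv <= bound for xv in xdom)
--     if op == "<":
--         return any(a * xv < bound for xv in xdom)
--     return False
-- ===== Notes on version B (the rewrite author's own statement) =====
-- stated objective: simpler
-- what changed: Replaces the triple loop over xdom, yv and all 2^nbool bit tuples by a single scan of xdom against the closed-form best bound k + max(mcoef, 0) (minimal bit-sum is 0), with an early return per comparison operator.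
import Mathlib
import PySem

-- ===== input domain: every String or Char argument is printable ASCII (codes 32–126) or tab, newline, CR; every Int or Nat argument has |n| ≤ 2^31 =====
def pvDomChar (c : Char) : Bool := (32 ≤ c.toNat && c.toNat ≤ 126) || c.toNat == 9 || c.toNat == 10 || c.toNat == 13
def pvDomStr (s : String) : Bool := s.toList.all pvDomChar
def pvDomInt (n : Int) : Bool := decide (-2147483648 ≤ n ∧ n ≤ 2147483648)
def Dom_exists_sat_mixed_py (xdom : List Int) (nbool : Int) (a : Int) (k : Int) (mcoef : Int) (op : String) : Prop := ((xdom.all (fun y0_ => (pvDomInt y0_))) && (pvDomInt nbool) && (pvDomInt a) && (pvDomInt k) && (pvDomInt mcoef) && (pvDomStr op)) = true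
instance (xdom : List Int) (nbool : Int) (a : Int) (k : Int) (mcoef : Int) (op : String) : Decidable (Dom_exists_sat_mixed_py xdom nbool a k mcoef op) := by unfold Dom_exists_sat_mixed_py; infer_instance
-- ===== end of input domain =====

-- B drops the enumeration of bit tuples and the yv loop: the minimal bit-sum is 0
-- and the best right-hand side is k + max(mcoef, 0), so one scan of xdom suffices
-- (objective: simpler).

-- ===== PORT A =====
-- itertools.product((0, 1), repeat=n), lexicographic order
def pyProduct01 : Nat → List (List Int)
  | 0 => [[]]
  | n + 1 => ([0, 1] : List Int).flatMap (fun b => (pyProduct01 n).map (fun t => b :: t))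

def exists_sat_mixed_py (xdom : List Int) (nbool : Int) (a : Int) (k : Int) (mcoef : Int) (op : String) : Bool :=
  -- Pre_ excludes the inputs on which Python raises (nbool < 0 with nonempty xdom)
  xdom.any (fun xv =>
    ([0, 1] : List Int).any (fun yv =>
      (pyProduct01 nbool.toNat).any (fun bits =>
        let lhs := a * xv + bits.sum
        let rhs := k + mcoef * yv
        (op == "<=" && decide (lhs ≤ rhs)) || (op == "<" && decide (lhs < rhs)))))

-- ===== PORT B =====
def exists_sat_mixed_py_alt (xdom : List Int) (nbool : Int) (a : Int) (k : Int) (mcoef : Int) (op : String) : Bool :=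
  let bound := k + (if mcoef > 0 then mcoef else 0)
  if op == "<=" then xdom.any (fun xv => decide (a * xv ≤ bound))
  else if op == "<" then xdom.any (fun xv => decide (a * xv < bound))
  else false

-- ===== PRECONDITION & SPEC =====
-- Pre_ excludes exactly the inputs where A raises ValueError: nbool < 0 reaches
-- itertools.product only when xdom is nonempty.
def Pre_exists_sat_mixed_py (xdom : List Int) (nbool : Int) (a : Int) (k : Int) (mcoef : Int) (op : String) : Prop :=
  0 ≤ nbool ∨ xdom = []
instance (xdom : List Int) (nbool : Int) (a : Int) (k : Int) (mcoef : Int) (op : String) : Decidable (Pre_exists_sat_mixed_py xdom nbool a k mcoef op) := by unfold Pre_exists_sat_mixed_py; infer_instance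
def pvWitness_exists_sat_mixed_py : List Int × Int × Int × Int × Int × String := ([0, 2], 2, 1, 1, -1, "<=")


def Spec_exists_sat_mixed_py (xdom : List Int) (nbool : Int) (a : Int) (k : Int) (mcoef : Int) (op : String) (out : Bool) : Prop := out = exists_sat_mixed_py_alt xdom nbool a k mcoef op
instance (xdom : List Int) (nbool : Int) (a : Int) (k : Int) (mcoef : Int) (op : String) (out : Bool) : Decidable (Spec_exists_sat_mixed_py xdom nbool a k mcoef op out) := by unfold Spec_exists_sat_mixed_py; infer_instance

-- ===== CLAIM (what is proved, stated in full; the proofs are below) =====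
def Claim_equal_exists_sat_mixed_py : Prop := ∀ (xdom : List Int) (nbool : Int) (a : Int) (k : Int) (mcoef : Int) (op : String), Dom_exists_sat_mixed_py xdom nbool a k mcoef op → Pre_exists_sat_mixed_py xdom nbool a k mcoef op → Spec_exists_sat_mixed_py xdom nbool a k mcoef op (exists_sat_mixed_py xdom nbool a k mcoef op)

-- ===== LEMMAS AND PROOFS =====

lemma replicate_mem_pyProduct01 (n : Nat) : List.replicate n (0 : Int) ∈ pyProduct01 n := by
  induction n with
  | zero => simp [pyProduct01]
  | succ n ih =>
    simp only [pyProduct01, List.mem_flatMap, List.mem_map]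
    exact ⟨0, by simp, List.replicate n 0, ih, by simp [List.replicate_succ]⟩

lemma sum_nonneg_pyProduct01 (n : Nat) : ∀ bits ∈ pyProduct01 n, 0 ≤ bits.sum := by
  induction n with
  | zero => simp [pyProduct01]
  | succ n ih =>
    intro bits h
    simp only [pyProduct01, List.mem_flatMap, List.mem_map] at h
    obtain ⟨b, hb, t, ht, rfl⟩ := h
    have := ih t ht
    simp at hb
    rcases hb with rfl | rfl <;> simp <;> omega

-- existence of a bit tuple with lhs ≤ r collapses to lhs with bit-sum 0
lemma prod_any_le (n : Nat) (x r : Int) :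
    (pyProduct01 n).any (fun bits => decide (x + bits.sum ≤ r)) = decide (x ≤ r) := by
  by_cases h : x ≤ r
  · simp only [h, decide_true, List.any_eq_true]
    exact ⟨List.replicate n 0, replicate_mem_pyProduct01 n, by simp [h]⟩
  · simp only [h, decide_false, List.any_eq_false]
    intro bits hb
    have := sum_nonneg_pyProduct01 n bits hb
    simp; omega

lemma prod_any_lt (n : Nat) (x r : Int) :
    (pyProduct01 n).any (fun bits => decide (x + bits.sum < r)) = decide (x < r) := by
  by_cases h : x < r
  · simp only [h, decide_true, List.any_eq_true]
    exact ⟨List.replicate n 0, replicate_mem_pyProduct01 n, by simp [h]⟩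
  · simp only [h, decide_false, List.any_eq_false]
    intro bits hb
    have := sum_nonneg_pyProduct01 n bits hb
    simp; omega

-- ===== VERDICT (by name: the statement is the Claim_ definition above) =====
theorem exists_sat_mixed_py_spec : Claim_equal_exists_sat_mixed_py := by
  intro xdom nbool a k mcoef op _ _
  unfold Spec_exists_sat_mixed_py exists_sat_mixed_py exists_sat_mixed_py_alt
  by_cases hle : op = "<="
  · subst hle
    simp only [beq_self_eq_true, Bool.true_and, if_pos, String.reduceBEq, Bool.false_and,
      Bool.or_false]
    refine congrArg xdom.any (funext fun xv => ?_)
    simp only [List.any_cons, List.any_nil, Bool.or_false, prod_any_le]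
    by_cases h : mcoef > 0 <;> simp [h, ← Bool.decide_or, decide_eq_decide] <;> omega
  · by_cases hlt : op = "<"
    · subst hlt
      simp only [String.reduceBEq, Bool.false_and, Bool.false_or, beq_self_eq_true,
        Bool.true_and, if_neg, if_pos]
      refine congrArg xdom.any (funext fun xv => ?_)
      simp only [List.any_cons, List.any_nil, Bool.or_false, prod_any_lt]
      by_cases h : mcoef > 0 <;> simp [h, ← Bool.decide_or, decide_eq_decide] <;> omega
    · have h1 : (op == "<=") = false := by simp [hle]
      have h2 : (op == "<") = false := by simp [hlt]
      simp [h1, h2]
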